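-- pv_equiv track=rewrite | github.com/shirley-wu/simul-mt_temporally-correlated-task-scheduling | scripts/test/calc_latency_from_log.py | convert_result_to_RW
-- ===== SOURCE A (Python) =====
-- def convert_result_to_RW(src, tgt, k):
--     n_src = len(src.strip().split(" "))
--     n_tgt = len(tgt.strip().split(" "))
--     out = []
--     # read prefix first
--     read = min(n_src, k - 1)
--     out += ["R", ] * read
--     # read & write iteratively
--     written = 0
--     while read < n_src and written < n_tgt:
--         out += ["R", "W", ]
--         read += 1
--         written += 1
--     # finalize
--     if written < n_tgt:
--         out += ["W", ] * (n_tgt - written)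
--     # elif read < n_src:
--     #     out += ["R", ] * (n_src - read)
--     return " ".join(out)
-- ===== SOURCE B (Python) =====
-- def convert_result_to_RW(src, tgt, k):
--     n_src = len(src.strip().split(" "))
--     n_tgt = len(tgt.strip().split(" "))
--     read = min(n_src, k - 1)
--     r = max(read, 0)                     # R-prefix length
--     p = min(n_src - read, n_tgt)         # number of interleaved R/W pairs
--     total = r + 2 * p + (n_tgt - p)      # total number of tokens
--
--     def token(i):
--         if i < r:
--             return "R"
--         if i < r + 2 * p:
--             return "R" if (i - r) % 2 == 0 else "W"
--         return "W"
--
--     return " ".join(token(i) for i in range(total))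
-- ===== Notes on version B (the rewrite author's own statement) =====
-- stated objective: alternative
-- what changed: Instead of appending tokens with a stateful while loop, B computes the total token count arithmetically and generates each token independently by a closed-form index classifier (position i -> R or W) mapped over range(total).
import Mathlib
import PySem

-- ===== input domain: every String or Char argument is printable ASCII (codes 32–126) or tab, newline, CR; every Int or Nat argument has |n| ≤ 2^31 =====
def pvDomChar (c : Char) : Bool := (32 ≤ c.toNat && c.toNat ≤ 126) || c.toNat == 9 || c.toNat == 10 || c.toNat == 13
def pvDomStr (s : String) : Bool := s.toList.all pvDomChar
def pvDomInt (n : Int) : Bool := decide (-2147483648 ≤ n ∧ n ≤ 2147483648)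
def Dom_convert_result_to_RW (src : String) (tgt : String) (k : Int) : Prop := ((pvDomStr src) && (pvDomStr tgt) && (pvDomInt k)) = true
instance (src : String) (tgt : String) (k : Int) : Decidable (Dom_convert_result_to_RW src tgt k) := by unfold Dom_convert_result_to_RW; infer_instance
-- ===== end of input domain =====

-- B replaces A's stateful appending while loop by computing the total token count and
-- generating each token independently from its index (objective: alternative).

-- ===== PORT A =====
-- the while loop: state (out, read, written); returns (out, written) at exit
def pvLoopA (out : List String) (read written n_src n_tgt : Int) : List String × Int :=
  if read < n_src ∧ written < n_tgt then
    pvLoopA (out ++ ["R", "W"]) (read + 1) (written + 1) n_src n_tgt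
  else (out, written)
termination_by (n_src - read).toNat
decreasing_by omega

-- the body of A after the two word counts are taken
def pvCoreA (n_src n_tgt k : Int) : String :=
  let read : Int := min n_src (k - 1)
  let out : List String := PySem.List.pyRepeat ["R"] read
  let r := pvLoopA out read 0 n_src n_tgt
  let out := r.1
  let written := r.2
  let out := if written < n_tgt then out ++ PySem.List.pyRepeat ["W"] (n_tgt - written) else out
  PySem.Str.join " " out

def convert_result_to_RW (src : String) (tgt : String) (k : Int) : String :=
  -- s.strip().split(" "): sep is the nonempty literal " ", so Python never raises; Chars.splitOn is exact
  pvCoreA ((PySem.Chars.splitOn (PySem.Str.strip src).toList [' ']).length : Int)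
    ((PySem.Chars.splitOn (PySem.Str.strip tgt).toList [' ']).length : Int) k

-- ===== PORT B =====
-- B's per-index token classifier: R-prefix, interleaved pair zone (even offset = R), W-suffix
def pvToken (r p : Int) (i : Int) : String :=
  if i < r then "R"
  else if i < r + 2 * p then (if PySem.Int.mod (i - r) 2 = 0 then "R" else "W")
  else "W"

-- the body of B after the two word counts are taken
def pvCoreB (n_src n_tgt k : Int) : String :=
  let read : Int := min n_src (k - 1)
  let r : Int := max read 0
  let p : Int := min (n_src - read) n_tgt
  let total : Int := r + 2 * p + (n_tgt - p)
  PySem.Str.join " " ((PySem.List.pyRange 0 total 1).map (pvToken r p))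

def convert_result_to_RW_alt (src : String) (tgt : String) (k : Int) : String :=
  pvCoreB ((PySem.Chars.splitOn (PySem.Str.strip src).toList [' ']).length : Int)
    ((PySem.Chars.splitOn (PySem.Str.strip tgt).toList [' ']).length : Int) k

-- ===== PRECONDITION & SPEC =====
def Spec_convert_result_to_RW (src : String) (tgt : String) (k : Int) (out : String) : Prop := out = convert_result_to_RW_alt src tgt k
instance (src : String) (tgt : String) (k : Int) (out : String) : Decidable (Spec_convert_result_to_RW src tgt k out) := by unfold Spec_convert_result_to_RW; infer_instance

-- ===== CLAIM (what is proved, stated in full; the proofs are below) =====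
def Claim_equal_convert_result_to_RW : Prop := ∀ (src : String) (tgt : String) (k : Int), Dom_convert_result_to_RW src tgt k → Spec_convert_result_to_RW src tgt k (convert_result_to_RW src tgt k)

-- ===== LEMMAS AND PROOFS =====

lemma pyRepeat_succ {α : Type} (xs : List α) (n : Int) (h : 0 ≤ n) :
    PySem.List.pyRepeat xs (n + 1) = xs ++ PySem.List.pyRepeat xs n := by
  simp only [PySem.List.pyRepeat]
  have : (n + 1).toNat = n.toNat + 1 := by omega
  rw [this, List.replicate_succ, List.flatten_cons]

lemma pvLoopA_eq (out : List String) (read written n_src n_tgt : Int) :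
    pvLoopA out read written n_src n_tgt =
      (out ++ PySem.List.pyRepeat ["R", "W"] (max 0 (min (n_src - read) (n_tgt - written))),
       written + max 0 (min (n_src - read) (n_tgt - written))) := by
  fun_induction pvLoopA out read written n_src n_tgt with
  | case1 out read written h ih =>
    obtain ⟨h1, h2⟩ := h
    rw [ih]
    have hm : max 0 (min (n_src - read) (n_tgt - written)) =
        max 0 (min (n_src - (read + 1)) (n_tgt - (written + 1))) + 1 := by omega
    rw [hm, pyRepeat_succ _ _ (by omega)]
    simp only [Prod.mk.injEq, List.append_assoc, true_and]
    omega
  | case2 out read written h =>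
    have hm : max 0 (min (n_src - read) (n_tgt - written)) = 0 := by
      push Not at h; omega
    rw [hm]
    simp [PySem.List.pyRepeat]

-- constant segments of the classifier
lemma map_token_prefix (r p : Int) (hr : 0 ≤ r) :
    (PySem.List.pyRange 0 r 1).map (pvToken r p) = List.replicate r.toNat "R" := by
  rw [List.map_congr_left (g := fun _ => "R") ?_]
  · rw [List.map_const', PySem.List.length_pyRange_one]
    congr 1; omega
  · intro i hi
    rw [PySem.List.mem_pyRange_one] at hi
    simp [pvToken, hi.2]

lemma map_token_suffix (r p a b : Int) (ha : r + 2 * p ≤ a) (hp : 0 ≤ p) :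
    (PySem.List.pyRange a b 1).map (pvToken r p) = List.replicate (b - a).toNat "W" := by
  rw [List.map_congr_left (g := fun _ => "W") ?_]
  · rw [List.map_const', PySem.List.length_pyRange_one]
  · intro i hi
    rw [PySem.List.mem_pyRange_one] at hi
    have h1 : ¬ i < r := by omega
    have h2 : ¬ i < r + 2 * p := by omega
    simp [pvToken, h1, h2]

lemma map_token_pairs_aux (r p : Int) (pN : Nat) (hpN : (pN : Int) ≤ p) :
    (PySem.List.pyRange r (r + 2 * pN) 1).map (pvToken r p) =
      (List.replicate pN (["R", "W"] : List String)).flatten := by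
  induction pN with
  | zero => simp [PySem.List.pyRange_one_eq_nil]
  | succ n ih =>
    have hn : (n : Int) ≤ p := by push_cast at hpN; omega
    have hsplit := PySem.List.pyRange_one_append r (r + 2 * n) (r + 2 * (n + 1 : Nat))
      (by omega) (by push_cast; omega)
    rw [hsplit, List.map_append, ih hn]
    have h2 : (r + 2 * ((n : Int) + 1)) = (r + 2 * n + 1) + 1 := by ring
    have hrange : PySem.List.pyRange (r + 2 * n) (r + 2 * (n + 1 : Nat)) 1
        = [r + 2 * n, r + 2 * n + 1] := by
      push_cast
      rw [h2, PySem.List.pyRange_one_cons (by omega), PySem.List.pyRange_one_singleton]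
    rw [hrange]
    have hR : pvToken r p (r + 2 * n) = "R" := by
      have h1 : ¬ r + 2 * (n : Int) < r := by omega
      have h2' : r + 2 * (n : Int) < r + 2 * p := by push_cast at hpN; omega
      have hmod : PySem.Int.mod (r + 2 * n - r) 2 = 0 := by
        rw [PySem.Int.mod_eq_zero_iff_dvd]; exact ⟨n, by ring⟩
      simp [pvToken, h1, h2']

    have hW : pvToken r p (r + 2 * n + 1) = "W" := by
      have h1 : ¬ r + 2 * (n : Int) + 1 < r := by omega
      have h2' : r + 2 * (n : Int) + 1 < r + 2 * p := by push_cast at hpN; omega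
      have hmod : ¬ PySem.Int.mod (r + 2 * n + 1 - r) 2 = 0 := by
        rw [PySem.Int.mod_eq_zero_iff_dvd]
        rintro ⟨c, hc⟩; omega
      simp [pvToken, h1, h2']
      omega
    rw [List.replicate_succ', List.flatten_append]
    simp [hR, hW]

lemma map_token_pairs (r p : Int) (hp : 0 ≤ p) :
    (PySem.List.pyRange r (r + 2 * p) 1).map (pvToken r p) =
      (List.replicate p.toNat (["R", "W"] : List String)).flatten := by
  have h : p = (p.toNat : Int) := by omega
  calc (PySem.List.pyRange r (r + 2 * p) 1).map (pvToken r p)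
      = (PySem.List.pyRange r (r + 2 * p.toNat) 1).map (pvToken r p) := by rw [← h]
    _ = _ := map_token_pairs_aux r p p.toNat (by omega)

lemma pyRepeat_singleton (c : String) (n : Int) :
    PySem.List.pyRepeat [c] n = List.replicate n.toNat c := by
  simp [PySem.List.pyRepeat, List.flatten_replicate_singleton]

lemma core_eq (n_src n_tgt k : Int) (ht : 0 ≤ n_tgt) :
    pvCoreA n_src n_tgt k = pvCoreB n_src n_tgt k := by
  unfold pvCoreA pvCoreB
  simp only [pvLoopA_eq]
  set read : Int := min n_src (k - 1) with hread_def
  have hread : read ≤ n_src := min_le_left _ _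
  have hp0 : max 0 (min (n_src - read) (n_tgt - 0)) = min (n_src - read) n_tgt := by omega
  rw [hp0]
  set p : Int := min (n_src - read) n_tgt with hp_def
  set r : Int := max read 0 with hr_def
  have hr : 0 ≤ r := le_max_right _ _
  have hp : 0 ≤ p := by omega
  have htot : r + 2 * p + (n_tgt - p) = (r + 2 * p) + (n_tgt - p) := by ring
  -- split B's range into the three index zones
  rw [htot, PySem.List.pyRange_one_append 0 (r + 2 * p) ((r + 2 * p) + (n_tgt - p))
        (by omega) (by omega),
      PySem.List.pyRange_one_append 0 r (r + 2 * p) (by omega) (by omega),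
      List.map_append, List.map_append,
      map_token_prefix r p hr, map_token_pairs r p hp, map_token_suffix r p _ _ le_rfl hp]
  have hsuf : ((r + 2 * p) + (n_tgt - p) - (r + 2 * p)).toNat = (n_tgt - p).toNat := by omega
  rw [hsuf]
  have hpre : PySem.List.pyRepeat ["R"] read = List.replicate r.toNat "R" := by
    rw [pyRepeat_singleton]; congr 1; omega
  have hpair : PySem.List.pyRepeat (["R", "W"] : List String) p
      = (List.replicate p.toNat (["R", "W"] : List String)).flatten := by
    simp [PySem.List.pyRepeat]
  by_cases hc : 0 + p < n_tgt
  · simp only [zero_add] at hc ⊢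
    rw [if_pos hc, hpre, hpair, pyRepeat_singleton, List.append_assoc]
  · simp only [zero_add] at hc ⊢
    rw [if_neg hc]
    have h0 : (n_tgt - p).toNat = 0 := by omega
    rw [h0, hpre, hpair]
    simp

-- ===== VERDICT (by name: the statement is the Claim_ definition above) =====
theorem convert_result_to_RW_spec : Claim_equal_convert_result_to_RW := by
  intro src tgt k _
  unfold Spec_convert_result_to_RW convert_result_to_RW convert_result_to_RW_alt
  exact core_eq _ _ _ (by positivity)
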